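-- pv_equiv track=rewrite | github.com/juanvallaure1/TFGJuan | algoritmos_geneticos_para_la_composicion_musical.py | recompensa_grados
-- ===== SOURCE A (Python) =====
-- def recompensa_grados(lista_notas:list, grados):
--     recompensa = 0
--     for i in range(len(lista_notas)//3):
--         acorde = lista_notas[i*3:i*3+3]
--         for i in range(len(acorde)):
--             acorde[i] %= 12
--         acorde = set(acorde)
--         if acorde in grados:
--             recompensa += 3
--
--     return recompensa
-- ===== SOURCE B (Python) =====
-- def recompensa_grados(lista_notas: list, grados):
--     # Build a frequency table of chords first (keyed by a canonical sorted tuple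
--     # of the pitch classes), then sum over the distinct allowed degree sets.
--     conteo = {}
--     for i in range(len(lista_notas) // 3):
--         clave = tuple(sorted({n % 12 for n in lista_notas[i*3:i*3+3]}))
--         conteo[clave] = conteo.get(clave, 0) + 1
--     total = 0
--     for grado in {tuple(sorted(set(g))) for g in grados}:
--         total += 3 * conteo.get(grado, 0)
--     return total
-- ===== Notes on version B (the rewrite author's own statement) =====
-- stated objective: faster
-- what changed: Inverts the control flow: instead of scanning grados for every chord, B builds a dict of chord frequencies keyed by a canonical sorted tuple of pitch classes in one pass, then sums 3*count over the distinct allowed degree sets, so the per-chord linear scan of grados disappears behind O(1) hash lookups.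
import Mathlib
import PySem

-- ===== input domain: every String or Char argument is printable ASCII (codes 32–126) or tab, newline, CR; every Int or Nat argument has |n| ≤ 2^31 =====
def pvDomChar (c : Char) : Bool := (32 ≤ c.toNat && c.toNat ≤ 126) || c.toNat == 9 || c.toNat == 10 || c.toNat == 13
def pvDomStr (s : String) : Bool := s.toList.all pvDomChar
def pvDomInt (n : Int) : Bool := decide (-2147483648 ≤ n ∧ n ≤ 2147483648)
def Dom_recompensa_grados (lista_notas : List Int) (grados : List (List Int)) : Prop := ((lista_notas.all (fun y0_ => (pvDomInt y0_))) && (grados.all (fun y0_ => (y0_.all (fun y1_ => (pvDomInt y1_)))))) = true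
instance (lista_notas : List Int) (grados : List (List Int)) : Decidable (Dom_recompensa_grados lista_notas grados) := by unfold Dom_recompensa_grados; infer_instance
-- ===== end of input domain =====

-- B builds a frequency table of chords keyed by a canonical sorted tuple of pitch classes,
-- then sums 3*count over the distinct allowed degree sets (control flow inverted vs A);
-- objective: alternative decomposition. 'grados' is a Python list of sets (inner List Int = set elements).

-- ===== PORT A =====
def recompensa_grados (lista_notas : List Int) (grados : List (List Int)) : Int :=
  (PySem.List.pyRange 0 (PySem.Int.floordiv (lista_notas.length : Int) 3) 1).foldl
    (fun recompensa i =>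
      let acorde := PySem.List.slice lista_notas (some (i * 3)) (some (i * 3 + 3))
      -- 'for i in range(len(acorde)): acorde[i] %= 12' — elementwise in-place update, ported as map
      let acorde := acorde.map (fun x => PySem.Int.mod x 12)
      let acordeS : PySem.Set Int := PySem.Set.ofList acorde
      -- 'acorde in grados': each element of grados is a Python set; set == set is PySem.Set.equal
      if grados.any (fun g => PySem.Set.equal acordeS g) then recompensa + 3 else recompensa)
    0

-- ===== PORT B =====
def recompensa_grados_alt (lista_notas : List Int) (grados : List (List Int)) : Int :=
  let conteo : PySem.Dict (List Int) Int :=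
    (List.range (lista_notas.length / 3)).foldl
      (fun (d : PySem.Dict (List Int) Int) (i : Nat) =>
        -- clave = tuple(sorted({n % 12 for n in lista_notas[i*3:i*3+3]}))
        let clave := PySem.List.sorted
          (PySem.Set.ofList ((PySem.List.slice lista_notas (some ((i : Int) * 3)) (some ((i : Int) * 3 + 3))).map
            (fun n => PySem.Int.mod n 12))) (fun x => x) false
        d.insert clave (d.getD clave 0 + 1))
      PySem.Dict.empty
  -- {tuple(sorted(set(g))) for g in grados}: iteration order of this set is not modelled,
  -- but the loop only sums, which is order-independent
  let permitidos : PySem.Set (List Int) :=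
    PySem.Set.ofList (grados.map (fun g => PySem.List.sorted (PySem.Set.ofList g) (fun x => x) false))
  permitidos.foldl (fun total grado => total + 3 * conteo.getD grado 0) 0

-- ===== PRECONDITION & SPEC =====
def Spec_recompensa_grados (lista_notas : List Int) (grados : List (List Int)) (out : Int) : Prop := out = recompensa_grados_alt lista_notas grados
instance (lista_notas : List Int) (grados : List (List Int)) (out : Int) : Decidable (Spec_recompensa_grados lista_notas grados out) := by unfold Spec_recompensa_grados; infer_instance

-- ===== CLAIM (what is proved, stated in full; the proofs are below) =====
def Claim_equal_recompensa_grados : Prop := ∀ (lista_notas : List Int) (grados : List (List Int)), Dom_recompensa_grados lista_notas grados → Spec_recompensa_grados lista_notas grados (recompensa_grados lista_notas grados)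

-- ===== LEMMAS AND PROOFS =====

-- the i-th chord, reduced mod 12
def pvChunk (ln : List Int) (k : Nat) : List Int :=
  (List.take 3 (List.drop (3 * k) ln)).map (fun x => PySem.Int.mod x 12)

-- canonical form of a set of notes: its distinct elements in increasing order
def pvCanon (l : List Int) : List Int :=
  PySem.List.sorted (PySem.Set.ofList l) (fun x => x) false

def pvMatch (ln : List Int) (grados : List (List Int)) (k : Nat) : Bool :=
  decide (pvCanon (pvChunk ln k) ∈ grados.map pvCanon)

theorem pvCanon_eq_iff (a b : List Int) : pvCanon a = pvCanon b ↔ (∀ x, x ∈ a ↔ x ∈ b) := by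
  unfold pvCanon
  rw [PySem.List.sorted_id_eq_sorted_id_iff_perm,
      List.perm_ext_iff_of_nodup (PySem.Set.nodup_ofList a) (PySem.Set.nodup_ofList b)]
  simp [PySem.Set.mem_ofList]

theorem pvSlice3 (ln : List Int) (m : Nat) :
    PySem.List.slice ln (some ((m : Int) * 3)) (some ((m : Int) * 3 + 3)) =
      List.take 3 (List.drop (3 * m) ln) := by
  have h2 : ((m : Int) * 3 + 3) = ((3 * m + 3 : Nat) : Int) := by push_cast; ring
  have h1 : ((m : Int) * 3) = ((3 * m : Nat) : Int) := by push_cast; ring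
  rw [h2, h1, PySem.List.slice_natCast]
  congr 1
  omega

theorem pvAny_eq_match (ln : List Int) (grados : List (List Int)) (k : Nat) :
    (grados.any (fun g => PySem.Set.equal (PySem.Set.ofList (pvChunk ln k)) g)) =
      pvMatch ln grados k := by
  rw [Bool.eq_iff_iff]
  simp only [pvMatch, List.any_eq_true, PySem.Set.equal_iff, PySem.Set.mem_ofList,
    decide_eq_true_eq, List.mem_map]
  constructor
  · rintro ⟨g, hg, h⟩
    exact ⟨g, hg, ((pvCanon_eq_iff _ _).2 (fun x => (h x))).symm⟩
  · rintro ⟨g, hg, h⟩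
    exact ⟨g, hg, fun x => (pvCanon_eq_iff _ _).1 h.symm x⟩

theorem pvA_loop (ln : List Int) (grados : List (List Int)) (m : Nat) (acc : Int) :
    (PySem.List.pyRange 0 (m : Int) 1).foldl
      (fun recompensa i =>
        let acorde := PySem.List.slice ln (some (i * 3)) (some (i * 3 + 3))
        let acorde := acorde.map (fun x => PySem.Int.mod x 12)
        let acordeS : PySem.Set Int := PySem.Set.ofList acorde
        if grados.any (fun g => PySem.Set.equal acordeS g) then recompensa + 3 else recompensa)
      acc
    = acc + 3 * ((List.range m).countP (pvMatch ln grados) : Int) := by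
  induction m generalizing acc with
  | zero => simp
  | succ n ih =>
    have hcast : ((n + 1 : Nat) : Int) = (n : Int) + 1 := by push_cast; ring
    rw [hcast, PySem.List.pyRange_one_succ_right (by positivity), List.foldl_append, ih,
      List.range_succ, List.countP_append]
    simp only [List.foldl_cons, List.foldl_nil]
    rw [pvSlice3]
    have : (List.take 3 (List.drop (3 * n) ln)).map (fun x => PySem.Int.mod x 12) = pvChunk ln n := rfl
    rw [this, pvAny_eq_match]
    by_cases h : pvMatch ln grados n = true
    · simp [h]; ring
    · simp [h]

theorem pvA_eq (ln : List Int) (grados : List (List Int)) :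
    recompensa_grados ln grados =
      3 * ((List.range (ln.length / 3)).countP (pvMatch ln grados) : Int) := by
  unfold recompensa_grados
  have h3 : PySem.Int.floordiv (ln.length : Int) 3 = ((ln.length / 3 : Nat) : Int) := by
    exact_mod_cast PySem.Int.floordiv_natCast ln.length 3
  rw [h3, pvA_loop]
  ring

theorem pvSum_if (S : List (List Int)) (a : List Int) (hS : S.Nodup) :
    (S.map (fun k => if a = k then (3 : Int) else 0)).sum = if a ∈ S then 3 else 0 := by
  induction S with
  | nil => simp
  | cons s S' ih =>
    rcases List.nodup_cons.1 hS with ⟨hs, hS'⟩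
    by_cases h : a = s
    · subst h
      have : (S'.map (fun k => if a = k then (3 : Int) else 0)).sum = 0 := by
        apply List.sum_eq_zero
        intro x hx
        rcases List.mem_map.1 hx with ⟨k, hk, rfl⟩
        have : a ≠ k := fun he => hs (he ▸ hk)
        simp [this]
      simp [this]
    · simp [h, ih hS']

theorem pvSum_count (K S : List (List Int)) (hS : S.Nodup) :
    (S.map (fun k => 3 * ((List.count k K : Nat) : Int))).sum =
      3 * ((K.countP (fun x => decide (x ∈ S)) : Nat) : Int) := by
  induction K with
  | nil => simp
  | cons a K' ih =>
    have hcnt : ∀ k : List Int,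
        3 * ((List.count k (a :: K') : Nat) : Int) =
          3 * ((List.count k K' : Nat) : Int) + (if a = k then (3 : Int) else 0) := by
      intro k
      rw [List.count_cons]
      by_cases h : a = k
      · simp [h]; ring
      · have : (a == k) = false := by simp [h]
        simp [this, h]
    calc (S.map (fun k => 3 * ((List.count k (a :: K') : Nat) : Int))).sum
        = (S.map (fun k => 3 * ((List.count k K' : Nat) : Int) + (if a = k then (3 : Int) else 0))).sum := by
          congr 1; exact List.map_congr_left (fun k _ => hcnt k)
      _ = (S.map (fun k => 3 * ((List.count k K' : Nat) : Int))).sum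
            + (S.map (fun k => if a = k then (3 : Int) else 0)).sum :=
          PySem.List.sum_map_add_int S _ _
      _ = 3 * ((K'.countP (fun x => decide (x ∈ S)) : Nat) : Int) + (if a ∈ S then 3 else 0) := by
          rw [ih, pvSum_if S a hS]
      _ = 3 * (((a :: K').countP (fun x => decide (x ∈ S)) : Nat) : Int) := by
          rw [List.countP_cons]
          by_cases h : a ∈ S
          · simp [h]; ring
          · simp [h]

theorem pvB_eq (ln : List Int) (grados : List (List Int)) :
    recompensa_grados_alt ln grados =
      3 * ((List.range (ln.length / 3)).countP (pvMatch ln grados) : Int) := by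
  unfold recompensa_grados_alt
  -- the dict-building loop over range is a counter over the list of canonical keys
  have hkey : ∀ i : Nat,
      PySem.List.sorted
        (PySem.Set.ofList ((PySem.List.slice ln (some ((i : Int) * 3)) (some ((i : Int) * 3 + 3))).map
          (fun n => PySem.Int.mod n 12))) (fun x => x) false = pvCanon (pvChunk ln i) :=
    fun i => by rw [pvSlice3]; rfl
  simp only [hkey]
  rw [show (List.range (ln.length / 3)).foldl
        (fun (d : PySem.Dict (List Int) Int) i =>
          d.insert (pvCanon (pvChunk ln i)) (d.getD (pvCanon (pvChunk ln i)) 0 + 1))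
        PySem.Dict.empty
      = ((List.range (ln.length / 3)).map (fun i => pvCanon (pvChunk ln i))).foldl
          (fun d x => d.insert x (d.getD x 0 + 1)) PySem.Dict.empty from
      (List.foldl_map (f := fun i => pvCanon (pvChunk ln i))
        (g := fun (d : PySem.Dict (List Int) Int) x => d.insert x (d.getD x 0 + 1))
        (l := List.range (ln.length / 3)) (init := PySem.Dict.empty)).symm]
  rw [PySem.List.foldl_add]
  have hgetD : ∀ k : List Int,
      (((List.range (ln.length / 3)).map (fun i => pvCanon (pvChunk ln i))).foldl
        (fun d x => d.insert x (d.getD x 0 + 1)) PySem.Dict.empty).getD k 0 =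
        ((List.count k ((List.range (ln.length / 3)).map (fun i => pvCanon (pvChunk ln i))) : Nat) : Int) := by
    intro k
    rw [PySem.Dict.getD_foldl_insert_add_one]
    simp
  have hmap : (PySem.Set.ofList (grados.map pvCanon)).map
        (fun grado => 3 * (((List.range (ln.length / 3)).map (fun i => pvCanon (pvChunk ln i))).foldl
          (fun d x => d.insert x (d.getD x 0 + 1)) PySem.Dict.empty).getD grado 0)
      = (PySem.Set.ofList (grados.map pvCanon)).map
        (fun k => 3 * ((List.count k ((List.range (ln.length / 3)).map (fun i => pvCanon (pvChunk ln i))) : Nat) : Int)) :=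
    List.map_congr_left (fun k _ => by rw [hgetD k])
  rw [show (fun g : List Int => PySem.List.sorted (PySem.Set.ofList g) (fun x => x) false) = pvCanon from rfl]
  rw [hmap, pvSum_count _ _ (PySem.Set.nodup_ofList _)]
  rw [List.countP_map]
  have : (List.range (ln.length / 3)).countP
        ((fun x => decide (x ∈ PySem.Set.ofList (grados.map pvCanon))) ∘ (fun i => pvCanon (pvChunk ln i)))
      = (List.range (ln.length / 3)).countP (pvMatch ln grados) := by
    apply List.countP_congr
    intro i _
    simp [pvMatch, Function.comp, PySem.Set.mem_ofList]
  rw [this]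
  ring

-- ===== VERDICT (by name: the statement is the Claim_ definition above) =====
theorem recompensa_grados_spec : Claim_equal_recompensa_grados := by
  intro ln grados _
  unfold Spec_recompensa_grados
  rw [pvA_eq, pvB_eq]
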